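-- pv_equiv track=rewrite | github.com/Dipesh-Chaudhary/SUDHAAR | src/data_processing.py | create_masked_sentences
-- ===== SOURCE A (Python) =====
-- from typing import List, Tuple, Dict
--
-- def create_masked_sentences(sentence: str, mask_token: str = "[MASK]") -> List[str]:
--     """
--     Create masked versions of sentence for MLM prediction
--     This is the strategy used in your inference notebook
--
--     Creates:
--     1. Mask each word individually
--     2. Mask each position between words (for insertions)
--     """
--     tokens = sentence.split()
--     masked_sentences = []
--
--     # Strategy 1: Mask each word
--     for i in range(len(tokens)):
--         masked = tokens.copy()
--         masked[i] = mask_token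
--         masked_sentences.append(' '.join(masked))
--
--     # Strategy 2: Mask positions (for insertions)
--     for i in range(len(tokens) + 1):
--         masked = tokens.copy()
--         masked.insert(i, mask_token)
--         masked_sentences.append(' '.join(masked))
--
--     return masked_sentences
-- ===== SOURCE B (Python) =====
-- def create_masked_sentences(sentence, mask_token="[MASK]"):
--     """Same outputs as A, but joins are precomputed once: prefix[i] = ' '.join(tokens[:i])
--     and suffix[i] = ' '.join(tokens[i:]), then each variant is glued from three pieces."""
--     tokens = sentence.split()
--     n = len(tokens)
--     prefix = ['']
--     for t in tokens:
--         prefix.append(t if len(prefix) == 1 else prefix[-1] + ' ' + t)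
--     suffix = ['']
--     for t in reversed(tokens):
--         suffix.insert(0, t if len(suffix) == 1 else t + ' ' + suffix[0])
--     word = [(prefix[i] + ' ' if i > 0 else '') + mask_token +
--             (' ' + suffix[i + 1] if i < n - 1 else '') for i in range(n)]
--     gaps = [(prefix[i] + ' ' if i > 0 else '') + mask_token +
--             (' ' + suffix[i] if i < n else '') for i in range(n + 1)]
--     return word + gaps
-- ===== Notes on version B (the rewrite author's own statement) =====
-- stated objective: alternative
-- what changed: Instead of copying the token list and re-joining it for every variant, B precomputes space-joined prefix and suffix strings for every split position once and glues each masked sentence from prefix, mask token and suffix.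
import Mathlib
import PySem

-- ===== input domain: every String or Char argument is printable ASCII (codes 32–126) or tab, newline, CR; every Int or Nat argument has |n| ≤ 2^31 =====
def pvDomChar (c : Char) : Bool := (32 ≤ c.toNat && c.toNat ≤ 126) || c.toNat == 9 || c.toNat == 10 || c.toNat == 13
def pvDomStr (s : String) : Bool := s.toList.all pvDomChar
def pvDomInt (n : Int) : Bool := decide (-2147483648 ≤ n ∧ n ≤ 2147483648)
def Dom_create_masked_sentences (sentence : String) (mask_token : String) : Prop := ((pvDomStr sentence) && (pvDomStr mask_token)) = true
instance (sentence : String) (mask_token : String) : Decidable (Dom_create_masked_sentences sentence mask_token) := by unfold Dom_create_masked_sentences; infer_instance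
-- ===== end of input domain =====

-- B replaces A's per-variant list copy + full re-join by precomputed prefix/suffix join strings
-- glued around the mask token (objective: alternative decomposition).

-- ===== PORT A =====
-- the two loops of A over tokens = sentence.split(); i from range(len(tokens)) is a valid
-- nonnegative index, so Python's 'masked[i] = mask_token' is List.set i.toNat (exact here)
def pvA_body (tokens : List String) (mask_token : String) : List String :=
  let masked_sentences := (PySem.List.pyRange 0 (PySem.List.len tokens) 1).foldl
    (fun acc i => acc ++ [PySem.Str.join " " (tokens.set i.toNat mask_token)]) []
  (PySem.List.pyRange 0 (PySem.List.len tokens + 1) 1).foldl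
    (fun acc i => acc ++ [PySem.Str.join " " (PySem.List.insert tokens i mask_token)]) masked_sentences

def create_masked_sentences (sentence : String) (mask_token : String) : List String :=
  pvA_body (PySem.Str.split₀ sentence) mask_token

-- ===== PORT B =====
-- prefix = [''] then prefix.append(t if len(prefix)==1 else prefix[-1]+' '+t) for t in tokens
def pvB_pre (tokens : List String) : List String :=
  tokens.foldl (fun pr t => pr ++ [if pr.length == 1 then t else pr.getLastD "" ++ " " ++ t]) [""]

-- suffix = [''] then suffix.insert(0, t if len(suffix)==1 else t+' '+suffix[0]) for t in reversed(tokens)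
def pvB_suf (tokens : List String) : List String :=
  tokens.foldr (fun t sf => (if sf.length == 1 then t else t ++ " " ++ sf.headD "") :: sf) [""]

def create_masked_sentences_alt (sentence : String) (mask_token : String) : List String :=
  let tokens := PySem.Str.split₀ sentence
  let n := tokens.length
  let pre := pvB_pre tokens
  let suf := pvB_suf tokens
  let word := (List.range n).map (fun i =>
    (if 0 < i then pre.getD i "" ++ " " else "") ++ mask_token ++
    (if i < n - 1 then " " ++ suf.getD (i + 1) "" else ""))
  let gaps := (List.range (n + 1)).map (fun i =>
    (if 0 < i then pre.getD i "" ++ " " else "") ++ mask_token ++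
    (if i < n then " " ++ suf.getD i "" else ""))
  word ++ gaps

-- ===== PRECONDITION & SPEC =====
def Spec_create_masked_sentences (sentence : String) (mask_token : String) (out : List String) : Prop := out = create_masked_sentences_alt sentence mask_token
instance (sentence : String) (mask_token : String) (out : List String) : Decidable (Spec_create_masked_sentences sentence mask_token out) := by unfold Spec_create_masked_sentences; infer_instance

-- ===== CLAIM (what is proved, stated in full; the proofs are below) =====
def Claim_equal_create_masked_sentences : Prop := ∀ (sentence : String) (mask_token : String), Dom_create_masked_sentences sentence mask_token → Spec_create_masked_sentences sentence mask_token (create_masked_sentences sentence mask_token)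

-- ===== LEMMAS AND PROOFS =====

-- ' '.join of a nonempty tail
theorem pv_join_cons_ne (sep p : List Char) (rest : List (List Char)) (h : rest ≠ []) :
    PySem.Chars.join sep (p :: rest) = p ++ sep ++ PySem.Chars.join sep rest := by
  cases rest with
  | nil => exact absurd rfl h
  | cons q r => exact PySem.Chars.join_cons_cons sep p q r

-- splitting a join around one element
theorem pv_join_split (sep m : List Char) (xs ys : List (List Char)) :
    PySem.Chars.join sep (xs ++ m :: ys) =
      (if xs = [] then [] else PySem.Chars.join sep xs ++ sep) ++ m ++
      (if ys = [] then [] else sep ++ PySem.Chars.join sep ys) := by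
  induction xs with
  | nil =>
      cases ys with
      | nil => simp [PySem.Chars.join_singleton]
      | cons y r => simp [pv_join_cons_ne sep m (y :: r) (by simp)]
  | cons x xs ih =>
      rw [List.cons_append, pv_join_cons_ne sep x (xs ++ m :: ys) (by simp), ih]
      cases xs with
      | nil => simp [PySem.Chars.join_singleton]
      | cons x' xs' => simp [pv_join_cons_ne sep x (x' :: xs') (by simp)]

theorem pv_str_join_append_singleton (ts : List String) (t : String) (h : ts ≠ []) :
    PySem.Str.join " " (ts ++ [t]) = PySem.Str.join " " ts ++ " " ++ t := by
  rw [← String.toList_inj]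
  simp only [String.toList_append, PySem.Str.toList_join, List.map_append, List.map_cons,
    List.map_nil]
  rw [pv_join_split " ".toList t.toList (ts.map String.toList) []]
  simp [h]

theorem pv_str_join_cons (t : String) (ts : List String) (h : ts ≠ []) :
    PySem.Str.join " " (t :: ts) = t ++ " " ++ PySem.Str.join " " ts := by
  rw [← String.toList_inj]
  simp only [String.toList_append, PySem.Str.toList_join, List.map_cons]
  rw [show t.toList :: ts.map String.toList = [] ++ t.toList :: ts.map String.toList from rfl,
    pv_join_split " ".toList t.toList [] (ts.map String.toList)]
  simp [h]

theorem pv_join_nil_str : PySem.Str.join " " [] = "" := by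
  rw [← String.toList_inj]; simp [PySem.Str.toList_join, PySem.Chars.join_nil]

theorem pv_join_singleton_str (t : String) : PySem.Str.join " " [t] = t := by
  rw [← String.toList_inj]; simp [PySem.Str.toList_join, PySem.Chars.join_singleton]

theorem pv_pre_spec (ts : List String) :
    pvB_pre ts = (List.range (ts.length + 1)).map (fun i => PySem.Str.join " " (ts.take i)) := by
  induction ts using List.reverseRecOn with
  | nil => simp [pvB_pre, pv_join_nil_str]
  | append_singleton ts t ih =>
      have hlen : (pvB_pre ts).length = ts.length + 1 := by rw [ih]; simp
      have hlast : (pvB_pre ts).getLastD "" = PySem.Str.join " " ts := by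
        rw [ih, List.getLastD_eq_getLast?, List.getLast?_eq_getElem?]
        simp
      have hstep : pvB_pre (ts ++ [t]) =
          pvB_pre ts ++ [if (pvB_pre ts).length == 1 then t
                         else (pvB_pre ts).getLastD "" ++ " " ++ t] := by
        simp only [pvB_pre, List.foldl_append, List.foldl_cons, List.foldl_nil]
      rw [hstep]
      rw [show (ts ++ [t]).length + 1 = (ts.length + 1) + 1 by simp]
      rw [List.range_succ, List.map_append]
      congr 1
      · rw [ih]
        apply List.map_congr_left
        intro i hi
        have hi' : i ≤ ts.length := by have := List.mem_range.mp hi; omega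
        rw [List.take_append_of_le_length hi']
      · simp only [List.map_cons, List.map_nil]
        congr 1
        have htake : (ts ++ [t]).take (ts.length + 1) = ts ++ [t] := by
          rw [show ts.length + 1 = (ts ++ [t]).length by simp, List.take_length]
        rw [htake]
        by_cases h0 : ts = []
        · subst h0
          simp [pvB_pre, pv_join_singleton_str]
        · have hne : ts.length ≠ 0 := by simpa [List.length_eq_zero_iff] using h0
          rw [if_neg (by simp [hlen]; omega), hlast]
          exact (pv_str_join_append_singleton ts t h0).symm

theorem pv_suf_spec (ts : List String) :
    pvB_suf ts = (List.range (ts.length + 1)).map (fun i => PySem.Str.join " " (ts.drop i)) := by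
  induction ts with
  | nil => simp [pvB_suf, pv_join_nil_str]
  | cons t ts ih =>
      have hlen : (pvB_suf ts).length = ts.length + 1 := by rw [ih]; simp
      have hhead : (pvB_suf ts).headD "" = PySem.Str.join " " ts := by
        rw [ih, List.range_succ_eq_map]; simp
      have hstep : pvB_suf (t :: ts) =
          (if (pvB_suf ts).length == 1 then t
           else t ++ " " ++ (pvB_suf ts).headD "") :: pvB_suf ts := by
        simp only [pvB_suf, List.foldr_cons]
      rw [hstep]
      rw [show (t :: ts).length + 1 = (ts.length + 1) + 1 by simp]
      have htail : (List.range (ts.length + 1)).map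
          ((fun i => PySem.Str.join " " ((t :: ts).drop i)) ∘ Nat.succ) = pvB_suf ts := by
        rw [ih]
        apply List.map_congr_left
        intro i hi
        simp [Function.comp]
      rw [List.range_succ_eq_map, List.map_cons, List.map_map, htail]
      congr 1
      by_cases h0 : ts = []
      · subst h0
        simp [pvB_suf, pv_join_singleton_str]
      · have hne : ts.length ≠ 0 := by simpa [List.length_eq_zero_iff] using h0
        rw [if_neg (by simp [hlen]; omega), hhead]
        simpa using (pv_str_join_cons t ts h0).symm

-- the glued element equals the joined masked list (word mask: position i, token removed)
theorem pv_word_elem (ts : List String) (m : String) (i : Nat) (hi : i < ts.length) :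
    PySem.Str.join " " (ts.take i ++ m :: ts.drop (i + 1)) =
      (if 0 < i then PySem.Str.join " " (ts.take i) ++ " " else "") ++ m ++
      (if i < ts.length - 1 then " " ++ PySem.Str.join " " (ts.drop (i + 1)) else "") := by
  rw [← String.toList_inj]
  simp only [String.toList_append, PySem.Str.toList_join, List.map_append, List.map_cons,
    apply_ite String.toList, String.toList_append]
  rw [pv_join_split]
  have hne : ts ≠ [] := by intro h; subst h; simp at hi
  by_cases h0 : 0 < i <;> by_cases h1 : i < ts.length - 1
  · have hi0 : i ≠ 0 := by omega
    have h2 : ¬ ts.length ≤ i + 1 := by omega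
    simp [hi0, hne, h2, h0, h1]
  · have hi0 : i ≠ 0 := by omega
    have h2 : ts.length ≤ i + 1 := by omega
    simp [hi0, hne, h2, h0, h1]
  · have hi0 : i = 0 := by omega
    have h2 : ¬ ts.length ≤ i + 1 := by omega
    have h3 : (List.map String.toList ts).tail ≠ [] := by
      intro h
      have := congrArg List.length h
      simp at this
      omega
    have h4 : 1 < ts.length := by omega
    simp [hi0, h3, h4]
  · have hi0 : i = 0 := by omega
    have h2 : ts.length ≤ i + 1 := by omega
    have h3 : (List.map String.toList ts).tail = [] := by
      apply List.eq_nil_of_length_eq_zero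
      simp
      omega
    have h4 : ¬ 1 < ts.length := by omega
    simp [hi0, h3, h4]

-- the glued element equals the joined inserted list (gap mask: position i)
theorem pv_gap_elem (ts : List String) (m : String) (i : Nat) (hi : i ≤ ts.length) :
    PySem.Str.join " " (ts.take i ++ m :: ts.drop i) =
      (if 0 < i then PySem.Str.join " " (ts.take i) ++ " " else "") ++ m ++
      (if i < ts.length then " " ++ PySem.Str.join " " (ts.drop i) else "") := by
  rw [← String.toList_inj]
  simp only [String.toList_append, PySem.Str.toList_join, List.map_append, List.map_cons,
    apply_ite String.toList, String.toList_append]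
  rw [pv_join_split]
  by_cases h1 : i < ts.length
  · have h2 : ¬ ts.length ≤ i := by omega
    by_cases h0 : 0 < i
    · have hi0 : i ≠ 0 := by omega
      have hne : ts ≠ [] := by intro h; subst h; simp at h1
      simp [hi0, hne, h2, h0, h1]
    · have hi0 : i = 0 := by omega
      have hne : ts ≠ [] := by intro h; subst h; simp at h1
      simp [hi0, hne]
  · have h2 : ts.length ≤ i := by omega
    by_cases h0 : 0 < i
    · have hi0 : i ≠ 0 := by omega
      have hne : ts ≠ [] := by intro h; subst h; simp at hi; omega
      simp [hi0, hne, h2, h0, h1]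
    · have hi0 : i = 0 := by omega
      have he : ts = [] := List.eq_nil_of_length_eq_zero (by omega)
      simp [hi0, he]

theorem pv_body_eq (ts : List String) (m : String) :
    pvA_body ts m =
      (List.range ts.length).map (fun i =>
        (if 0 < i then (pvB_pre ts).getD i "" ++ " " else "") ++ m ++
        (if i < ts.length - 1 then " " ++ (pvB_suf ts).getD (i + 1) "" else "")) ++
      (List.range (ts.length + 1)).map (fun i =>
        (if 0 < i then (pvB_pre ts).getD i "" ++ " " else "") ++ m ++
        (if i < ts.length then " " ++ (pvB_suf ts).getD i "" else "")) := by
  have hgetpre : ∀ i, i < ts.length + 1 →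
      (pvB_pre ts).getD i "" = PySem.Str.join " " (ts.take i) := by
    intro i hi
    rw [pv_pre_spec, List.getD_eq_getElem?_getD]
    simp [hi]
  have hgetsuf : ∀ i, i < ts.length + 1 →
      (pvB_suf ts).getD i "" = PySem.Str.join " " (ts.drop i) := by
    intro i hi
    rw [pv_suf_spec, List.getD_eq_getElem?_getD]
    simp [hi]
  rw [pvA_body]
  simp only [PySem.List.foldl_append_singleton_eq_map, List.nil_append, PySem.List.len_eq]
  rw [show ((ts.length : Int) + 1) = ((ts.length + 1 : Nat) : Int) by push_cast; ring]
  rw [PySem.List.pyRange_zero_nat, PySem.List.pyRange_zero_nat, List.map_map, List.map_map]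
  congr 1
  · apply List.map_congr_left
    intro i hi
    have hi' : i < ts.length := List.mem_range.mp hi
    simp only [Function.comp]
    rw [show ((i : Int)).toNat = i by simp]
    rw [List.set_eq_take_append_cons_drop, if_pos hi']
    rw [pv_word_elem ts m i hi', hgetpre i (by omega), hgetsuf (i+1) (by omega)]
  · apply List.map_congr_left
    intro i hi
    have hi' : i ≤ ts.length := by have := List.mem_range.mp hi; omega
    simp only [Function.comp]
    rw [PySem.List.insert_natCast ts i m hi']
    rw [pv_gap_elem ts m i hi', hgetpre i (by omega)]
    by_cases h1 : i < ts.length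
    · rw [if_pos h1, if_pos h1, hgetsuf i (by omega)]
    · rw [if_neg h1, if_neg h1]

-- ===== VERDICT (by name: the statement is the Claim_ definition above) =====
theorem create_masked_sentences_spec : Claim_equal_create_masked_sentences := by
  intro sentence mask_token _
  show create_masked_sentences sentence mask_token = create_masked_sentences_alt sentence mask_token
  rw [create_masked_sentences, create_masked_sentences_alt]
  exact pv_body_eq (PySem.Str.split₀ sentence) mask_token
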